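-- pv_equiv track=rewrite | github.com/wanmok/iterx | src/iterx/metrics/famus/ceaf_rme.py | phi_for_clusters_rme
-- ===== SOURCE A (Python) =====
-- from typing import OrderedDict, List, Union, Tuple, Optional, Callable
-- from typing import List, Dict, Optional, Set
--
-- IterXEntity = List[Tuple[str, str, str]]  # (template_type, slot_type, mention_str)
--
-- def phi_for_clusters_rme(
--         gold_clustering: List[IterXEntity],
--         predicted_clustering: List[IterXEntity],
--         one_to_one: bool = False
-- ) -> Tuple[int, int]:
--     def count_cluster_match(a, b):
--         count_match = 0
--         matched_cluster = set()
--         has_seen = set()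
--         for c_i, c in enumerate(a):
--             found = False
--             for m in c:
--                 if found:
--                     break
--                 for c2_i, c2 in enumerate(b):
--                     if one_to_one and c2_i in has_seen:
--                         continue
--
--                     if m in c2:
--                         found = True
--                         matched_cluster.add(c2_i)
--                         has_seen.add(c2_i)
--                         break
--             if found:
--                 count_match += 1
--         return count_match, len(matched_cluster)
--
--     return count_cluster_match(predicted_clustering, gold_clustering)
-- ===== SOURCE B (Python) =====
-- def phi_for_clusters_rme(gold_clustering, predicted_clustering, one_to_one=False):
--     # Index each mention to the ascending list of gold cluster indices containing it,
--     # then resolve each predicted cluster against candidate lists only.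
--     pairs = [(m, gi) for gi, g in enumerate(gold_clustering) for m in g]
--     index = {}
--     for m, gi in pairs:
--         index.setdefault(m, []).append(gi)
--     count_match = 0
--     matched = set()
--     for c in predicted_clustering:
--         for m in c:
--             cands = index.get(m, [])
--             if one_to_one:
--                 gi = next((i for i in cands if i not in matched), None)
--             else:
--                 gi = cands[0] if cands else None
--             if gi is None:
--                 continue
--             matched.add(gi)
--             count_match += 1
--             break
--     return count_match, len(matched)
-- ===== Notes on version B (the rewrite author's own statement) =====
-- stated objective: faster
-- what changed: Replaces the triple nested scan (predicted cluster x mention x all gold clusters x gold mentions) by a one-pass mention->gold-cluster-indices dictionary built once, so each predicted mention is resolved by a lookup over its candidate index list.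
import Mathlib
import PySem

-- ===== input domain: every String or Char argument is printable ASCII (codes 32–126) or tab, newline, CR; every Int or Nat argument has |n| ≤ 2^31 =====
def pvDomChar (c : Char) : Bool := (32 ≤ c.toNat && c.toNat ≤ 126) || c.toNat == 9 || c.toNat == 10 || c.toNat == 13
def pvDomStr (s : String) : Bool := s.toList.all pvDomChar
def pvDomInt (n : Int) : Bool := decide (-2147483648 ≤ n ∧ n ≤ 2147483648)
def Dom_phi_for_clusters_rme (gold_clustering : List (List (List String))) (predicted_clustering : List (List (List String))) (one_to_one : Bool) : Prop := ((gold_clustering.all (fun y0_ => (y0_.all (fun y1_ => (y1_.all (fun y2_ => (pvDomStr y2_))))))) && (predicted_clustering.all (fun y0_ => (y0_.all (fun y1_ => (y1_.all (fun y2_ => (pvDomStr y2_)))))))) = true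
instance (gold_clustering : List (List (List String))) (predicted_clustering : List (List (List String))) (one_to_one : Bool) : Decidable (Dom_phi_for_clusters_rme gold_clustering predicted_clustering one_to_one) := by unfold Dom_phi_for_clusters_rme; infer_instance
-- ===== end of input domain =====

-- B replaces A's rescan of all gold clusters per predicted mention by a mention->gold-indices
-- dictionary built once (objective: faster; mention-indexing instead of nested scans).

-- ===== PORT A =====
-- inner `for c2_i, c2 in enumerate(b)` loop: returns the matched gold index, none = not found
def aFind (one_to_one : Bool) (has_seen : PySem.Set Int) (m : List String) : List (Int × List (List String)) → Option Int
  | [] => none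
  | (i, c2) :: rest =>
      if one_to_one && PySem.Set.contains has_seen i then aFind one_to_one has_seen m rest
      else if c2.contains m then some i
      else aFind one_to_one has_seen m rest

-- `for m in c` loop with the `if found: break` guard
def aMentions (one_to_one : Bool) (benum : List (Int × List (List String))) (has_seen : PySem.Set Int) : List (List String) → Option Int
  | [] => none
  | m :: ms =>
      match aFind one_to_one has_seen m benum with
      | some i => some i
      | none => aMentions one_to_one benum has_seen ms

-- outer `for c_i, c in enumerate(a)` loop, state (count_match, matched_cluster, has_seen)
def aOuter (one_to_one : Bool) (benum : List (Int × List (List String))) :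
    List (List (List String)) → Int × PySem.Set Int × PySem.Set Int → Int × PySem.Set Int × PySem.Set Int
  | [], st => st
  | c :: rest, (cnt, matched, seen) =>
      match aMentions one_to_one benum seen c with
      | some i => aOuter one_to_one benum rest (cnt + 1, PySem.Set.add matched i, PySem.Set.add seen i)
      | none => aOuter one_to_one benum rest (cnt, matched, seen)

def phi_for_clusters_rme (gold_clustering : List (List (List String))) (predicted_clustering : List (List (List String))) (one_to_one : Bool) : List Int :=
  let st := aOuter one_to_one (PySem.List.enumerate gold_clustering) predicted_clustering (0, PySem.Set.empty, PySem.Set.empty)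
  [st.1, PySem.Set.len st.2.1]

-- ===== PORT B =====
-- pairs = [(m, gi) for gi, g in enumerate(gold_clustering) for m in g]
def bPairs (gold : List (List (List String))) : List (List String × Int) :=
  (PySem.List.enumerate gold).flatMap (fun ic => ic.2.map (fun m => (m, ic.1)))

-- index = {}; for m, gi in pairs: index.setdefault(m, []).append(gi)
def bIndex (gold : List (List (List String))) : PySem.Dict (List String) (List Int) :=
  (bPairs gold).foldl (fun d p => d.modify p.1 [] (· ++ [p.2])) PySem.Dict.empty

-- candidate choice: first unseen index (one_to_one) or cands[0]
def bPick (one_to_one : Bool) (matched : PySem.Set Int) (cands : List Int) : Option Int :=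
  if one_to_one then cands.find? (fun i => !PySem.Set.contains matched i) else cands.head?

-- `for m in c` loop of B
def bMentions (one_to_one : Bool) (idx : PySem.Dict (List String) (List Int)) (matched : PySem.Set Int) : List (List String) → Option Int
  | [] => none
  | m :: ms =>
      match bPick one_to_one matched (idx.getD m []) with
      | some i => some i
      | none => bMentions one_to_one idx matched ms

-- `for c in predicted_clustering` loop of B, state (count_match, matched)
def bLoop (one_to_one : Bool) (idx : PySem.Dict (List String) (List Int)) :
    List (List (List String)) → Int × PySem.Set Int → Int × PySem.Set Int
  | [], st => st
  | c :: rest, (cnt, matched) =>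
      match bMentions one_to_one idx matched c with
      | some i => bLoop one_to_one idx rest (cnt + 1, PySem.Set.add matched i)
      | none => bLoop one_to_one idx rest (cnt, matched)

def phi_for_clusters_rme_alt (gold_clustering : List (List (List String))) (predicted_clustering : List (List (List String))) (one_to_one : Bool) : List Int :=
  let st := bLoop one_to_one (bIndex gold_clustering) predicted_clustering (0, PySem.Set.empty)
  [st.1, PySem.Set.len st.2]

-- ===== PRECONDITION & SPEC =====
def Spec_phi_for_clusters_rme (gold_clustering : List (List (List String))) (predicted_clustering : List (List (List String))) (one_to_one : Bool) (out : List Int) : Prop := out = phi_for_clusters_rme_alt gold_clustering predicted_clustering one_to_one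
instance (gold_clustering : List (List (List String))) (predicted_clustering : List (List (List String))) (one_to_one : Bool) (out : List Int) : Decidable (Spec_phi_for_clusters_rme gold_clustering predicted_clustering one_to_one out) := by unfold Spec_phi_for_clusters_rme; infer_instance

-- ===== CLAIM (what is proved, stated in full; the proofs are below) =====
def Claim_equal_phi_for_clusters_rme : Prop := ∀ (gold_clustering : List (List (List String))) (predicted_clustering : List (List (List String))) (one_to_one : Bool), Dom_phi_for_clusters_rme gold_clustering predicted_clustering one_to_one → Spec_phi_for_clusters_rme gold_clustering predicted_clustering one_to_one (phi_for_clusters_rme gold_clustering predicted_clustering one_to_one)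

-- ===== LEMMAS AND PROOFS =====

-- the candidate list for a mention: gold indices (with multiplicity, ascending) containing it
def candsOf (m : List String) (l : List (Int × List (List String))) : List Int :=
  ((l.flatMap (fun ic => ic.2.map (fun x => (x, ic.1)))).filter (fun p => p.1 == m)).map (·.2)

-- the dictionary B builds answers candsOf over the enumerated gold list
theorem bIndex_getD (gold : List (List (List String))) (m : List String) :
    (bIndex gold).getD m [] = candsOf m (PySem.List.enumerate gold) := by
  unfold bIndex candsOf bPairs
  rw [PySem.Dict.getD_foldl_modify_append]
  simp [PySem.Dict.getD_empty]

theorem candsOf_cons (m : List String) (i : Int) (c : List (List String))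
    (tl : List (Int × List (List String))) :
    candsOf m ((i, c) :: tl) = List.replicate (c.count m) i ++ candsOf m tl := by
  simp only [candsOf, List.flatMap_cons, List.filter_append, List.map_append]
  congr 1
  induction c with
  | nil => simp
  | cons x xs ih =>
    cases h : (x == m) <;>
      simp [h, List.count_cons, List.replicate_succ, ih]

theorem find?_replicate_append {α : Type} (p : α → Bool) (k : Nat) (a : α) (l : List α) :
    List.find? p (List.replicate k a ++ l) =
      if k = 0 then List.find? p l else if p a then some a else List.find? p l := by
  induction k with
  | zero => simp
  | succ n ih =>
    cases h : p a
    · simp only [List.replicate_succ, List.cons_append, List.find?, h]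
      rw [ih]
      by_cases hn : n = 0 <;> simp [hn, h]
    · simp [List.replicate_succ, h]

theorem head?_replicate_append {α : Type} (k : Nat) (a : α) (l : List α) :
    (List.replicate k a ++ l).head? = if k = 0 then l.head? else some a := by
  cases k <;> simp [List.replicate_succ]

theorem aFind_eq_bPick (one : Bool) (seen : PySem.Set Int) (m : List String)
    (l : List (Int × List (List String))) :
    aFind one seen m l = bPick one seen (candsOf m l) := by
  induction l with
  | nil => cases one <;> rfl
  | cons hd tl ih =>
    obtain ⟨i, c⟩ := hd
    rw [candsOf_cons]
    by_cases hm : m ∈ c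
    · have hk : c.count m ≠ 0 := by simp [List.count_eq_zero, hm]
      cases one with
      | false =>
        unfold bPick at ih ⊢
        rw [head?_replicate_append]
        simp [aFind, hm, hk]
      | true =>
        unfold bPick at ih ⊢
        rw [find?_replicate_append]
        by_cases hs : i ∈ seen <;> simp [aFind, hm, hk, hs, ih]
    · have hk : c.count m = 0 := by simp [List.count_eq_zero, hm]
      cases one with
      | false =>
        unfold bPick at ih ⊢
        rw [head?_replicate_append]
        simp [aFind, hm, hk, ih]
      | true =>
        unfold bPick at ih ⊢
        rw [find?_replicate_append]
        by_cases hs : i ∈ seen <;> simp [aFind, hm, hk, hs, ih]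

theorem aMentions_eq_bMentions (one : Bool) (gold : List (List (List String)))
    (seen : PySem.Set Int) (c : List (List String)) :
    aMentions one (PySem.List.enumerate gold) seen c = bMentions one (bIndex gold) seen c := by
  induction c with
  | nil => rfl
  | cons m ms ih =>
    simp only [aMentions, bMentions, ih, bIndex_getD]
    rw [aFind_eq_bPick]

theorem aOuter_eq_bLoop (one : Bool) (gold : List (List (List String)))
    (pred : List (List (List String))) (cnt : Int) (s : PySem.Set Int) :
    aOuter one (PySem.List.enumerate gold) pred (cnt, s, s) =
      ((bLoop one (bIndex gold) pred (cnt, s)).1,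
       (bLoop one (bIndex gold) pred (cnt, s)).2,
       (bLoop one (bIndex gold) pred (cnt, s)).2) := by
  induction pred generalizing cnt s with
  | nil => rfl
  | cons c rest ih =>
    simp only [aOuter, bLoop, aMentions_eq_bMentions]
    cases bMentions one (bIndex gold) s c with
    | none => exact ih cnt s
    | some i => exact ih (cnt + 1) (PySem.Set.add s i)

-- ===== VERDICT (by name: the statement is the Claim_ definition above) =====
theorem phi_for_clusters_rme_spec : Claim_equal_phi_for_clusters_rme := by
  intro gold pred one _
  unfold Spec_phi_for_clusters_rme phi_for_clusters_rme phi_for_clusters_rme_alt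
  rw [aOuter_eq_bLoop]
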